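-- pv_equiv track=rewrite | github.com/sangeethasanthiralingam/learnstyle-ai | ml_models/emotion_ai/emotion_fusion_engine.py | _are_emotions_similar
-- ===== SOURCE A (Python) =====
-- def _are_emotions_similar(emotion1: str, emotion2: str) -> bool:
--     """Check if two emotions are similar"""
--     similar_groups = [
--         ['happy', 'excited', 'focused'],
--         ['sad', 'bored'],
--         ['angry', 'frustrated'],
--         ['fear', 'anxious'],
--         ['confused', 'overwhelmed']
--     ]
--
--     for group in similar_groups:
--         if emotion1 in group and emotion2 in group:
--             return True
--     return False
-- ===== SOURCE B (Python) =====
-- _SIMILAR_GROUPS = [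
--     ['happy', 'excited', 'focused'],
--     ['sad', 'bored'],
--     ['angry', 'frustrated'],
--     ['fear', 'anxious'],
--     ['confused', 'overwhelmed']
-- ]
--
-- _EMOTION_GROUP = {}
-- for _gid, _group in enumerate(_SIMILAR_GROUPS):
--     for _e in _group:
--         _EMOTION_GROUP[_e] = _gid
--
--
-- def _are_emotions_similar(emotion1: str, emotion2: str) -> bool:
--     """Check if two emotions are similar (inverted-index lookup)"""
--     g1 = _EMOTION_GROUP.get(emotion1)
--     return g1 is not None and g1 == _EMOTION_GROUP.get(emotion2)
-- ===== Notes on version B (the rewrite author's own statement) =====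
-- stated objective: idiomatic
-- what changed: Replaces the per-call scan over the group lists with an emotion-to-group-id inverted index built once; the call is then two dict lookups and an equality test.
import Mathlib
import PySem

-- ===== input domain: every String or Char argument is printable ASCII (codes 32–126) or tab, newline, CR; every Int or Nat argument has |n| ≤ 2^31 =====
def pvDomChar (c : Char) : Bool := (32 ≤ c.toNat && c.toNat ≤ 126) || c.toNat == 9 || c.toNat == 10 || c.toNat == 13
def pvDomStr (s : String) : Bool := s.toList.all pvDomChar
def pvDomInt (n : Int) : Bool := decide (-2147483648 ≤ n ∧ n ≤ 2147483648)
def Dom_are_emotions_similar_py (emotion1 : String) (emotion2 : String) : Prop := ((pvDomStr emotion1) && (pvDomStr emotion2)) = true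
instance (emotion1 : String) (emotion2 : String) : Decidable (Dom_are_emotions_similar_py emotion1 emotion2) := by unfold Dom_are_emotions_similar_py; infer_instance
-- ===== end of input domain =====

-- B replaces A's per-call scan over the group lists with an emotion → group-id inverted index
-- built once (idiomatic table lookup); same return value everywhere.

-- ===== PORT A =====
-- A's hard-coded similar_groups list
def pvSimilarGroups : List (List String) :=
  [["happy", "excited", "focused"],
   ["sad", "bored"],
   ["angry", "frustrated"],
   ["fear", "anxious"],
   ["confused", "overwhelmed"]]

-- 'for group in similar_groups: if e1 in group and e2 in group: return True' / 'return False'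
def pvScanGroups (gs : List (List String)) (e1 e2 : String) : Bool :=
  match gs with
  | [] => false
  | g :: rest => if g.contains e1 && g.contains e2 then true else pvScanGroups rest e1 e2

def are_emotions_similar_py (emotion1 : String) (emotion2 : String) : Bool :=
  pvScanGroups pvSimilarGroups emotion1 emotion2

-- ===== PORT B =====
-- B's own copy of the group data (Source B's _SIMILAR_GROUPS)
def pvSimilarGroupsB : List (List String) :=
  [["happy", "excited", "focused"],
   ["sad", "bored"],
   ["angry", "frustrated"],
   ["fear", "anxious"],
   ["confused", "overwhelmed"]]

-- the module-level build loop: for gid, group in enumerate(...): for e in group: _EMOTION_GROUP[e] = gid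
def pvEmotionGroup : PySem.Dict String Int :=
  (PySem.List.enumerate pvSimilarGroupsB).foldl
    (fun d p => p.2.foldl (fun d' e => d'.insert e p.1) d) PySem.Dict.empty

-- g1 = _EMOTION_GROUP.get(e1); return g1 is not None and g1 == _EMOTION_GROUP.get(e2)
def are_emotions_similar_py_alt (emotion1 : String) (emotion2 : String) : Bool :=
  match pvEmotionGroup.get? emotion1 with
  | none => false
  | some g1 => some g1 == pvEmotionGroup.get? emotion2

-- ===== PRECONDITION & SPEC =====
def Spec_are_emotions_similar_py (emotion1 : String) (emotion2 : String) (out : Bool) : Prop := out = are_emotions_similar_py_alt emotion1 emotion2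
instance (emotion1 : String) (emotion2 : String) (out : Bool) : Decidable (Spec_are_emotions_similar_py emotion1 emotion2 out) := by unfold Spec_are_emotions_similar_py; infer_instance

-- ===== CLAIM (what is proved, stated in full; the proofs are below) =====
def Claim_equal_are_emotions_similar_py : Prop := ∀ (emotion1 : String) (emotion2 : String), Dom_are_emotions_similar_py emotion1 emotion2 → Spec_are_emotions_similar_py emotion1 emotion2 (are_emotions_similar_py emotion1 emotion2)

-- ===== LEMMAS AND PROOFS =====

-- every string either is one of the 11 listed emotions or differs from all of them
lemma pvClassify (e : String) :
    e = "happy" ∨ e = "excited" ∨ e = "focused" ∨ e = "sad" ∨ e = "bored" ∨ e = "angry" ∨ e = "frustrated" ∨ e = "fear" ∨ e = "anxious" ∨ e = "confused" ∨ e = "overwhelmed" ∨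
    (e ≠ "happy" ∧ e ≠ "excited" ∧ e ≠ "focused" ∧ e ≠ "sad" ∧ e ≠ "bored" ∧ e ≠ "angry" ∧ e ≠ "frustrated" ∧ e ≠ "fear" ∧ e ≠ "anxious" ∧ e ≠ "confused" ∧ e ≠ "overwhelmed") := by
  by_cases h0 : e = "happy"
  · tauto
  by_cases h1 : e = "excited"
  · tauto
  by_cases h2 : e = "focused"
  · tauto
  by_cases h3 : e = "sad"
  · tauto
  by_cases h4 : e = "bored"
  · tauto
  by_cases h5 : e = "angry"
  · tauto
  by_cases h6 : e = "frustrated"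
  · tauto
  by_cases h7 : e = "fear"
  · tauto
  by_cases h8 : e = "anxious"
  · tauto
  by_cases h9 : e = "confused"
  · tauto
  by_cases h10 : e = "overwhelmed"
  · tauto
  tauto

-- the built index as a literal dict
lemma pvEmotionGroup_eq :
    pvEmotionGroup = PySem.Dict.mk
      [("happy", 0), ("excited", 0), ("focused", 0),
       ("sad", 1), ("bored", 1),
       ("angry", 2), ("frustrated", 2),
       ("fear", 3), ("anxious", 3),
       ("confused", 4), ("overwhelmed", 4)] := by
  decide

-- a string different from all 11 emotions is absent from the index
lemma pvLookupNone (e : String)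
    (a1 : e ≠ "happy") (a2 : e ≠ "excited") (a3 : e ≠ "focused") (a4 : e ≠ "sad")
    (a5 : e ≠ "bored") (a6 : e ≠ "angry") (a7 : e ≠ "frustrated") (a8 : e ≠ "fear")
    (a9 : e ≠ "anxious") (a10 : e ≠ "confused") (a11 : e ≠ "overwhelmed") :
    pvEmotionGroup.get? e = none := by
  simp [pvEmotionGroup_eq, PySem.Dict.get?,
    Ne.symm a1, Ne.symm a2, Ne.symm a3, Ne.symm a4, Ne.symm a5, Ne.symm a6,
    Ne.symm a7, Ne.symm a8, Ne.symm a9, Ne.symm a10, Ne.symm a11]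

-- A returns False when its first argument is in no group
lemma pvScanLeftFalse (e1 e2 : String)
    (a1 : e1 ≠ "happy") (a2 : e1 ≠ "excited") (a3 : e1 ≠ "focused") (a4 : e1 ≠ "sad")
    (a5 : e1 ≠ "bored") (a6 : e1 ≠ "angry") (a7 : e1 ≠ "frustrated") (a8 : e1 ≠ "fear")
    (a9 : e1 ≠ "anxious") (a10 : e1 ≠ "confused") (a11 : e1 ≠ "overwhelmed") :
    are_emotions_similar_py e1 e2 = false := by
  simp [are_emotions_similar_py, pvScanGroups, pvSimilarGroups,
    a1, a2, a3, a4, a5, a6, a7, a8, a9, a10, a11]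

-- A returns False when its second argument is in no group
lemma pvScanRightFalse (e1 e2 : String)
    (a1 : e2 ≠ "happy") (a2 : e2 ≠ "excited") (a3 : e2 ≠ "focused") (a4 : e2 ≠ "sad")
    (a5 : e2 ≠ "bored") (a6 : e2 ≠ "angry") (a7 : e2 ≠ "frustrated") (a8 : e2 ≠ "fear")
    (a9 : e2 ≠ "anxious") (a10 : e2 ≠ "confused") (a11 : e2 ≠ "overwhelmed") :
    are_emotions_similar_py e1 e2 = false := by
  simp [are_emotions_similar_py, pvScanGroups, pvSimilarGroups,
    a1, a2, a3, a4, a5, a6, a7, a8, a9, a10, a11]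

-- B returns False when the first lookup misses
lemma pvAltLeftFalse (e1 e2 : String) (h : pvEmotionGroup.get? e1 = none) :
    are_emotions_similar_py_alt e1 e2 = false := by
  simp [are_emotions_similar_py_alt, h]

-- B returns False when the second lookup misses
lemma pvAltRightFalse (e1 e2 : String) (h : pvEmotionGroup.get? e2 = none) :
    are_emotions_similar_py_alt e1 e2 = false := by
  unfold are_emotions_similar_py_alt
  rw [h]
  cases pvEmotionGroup.get? e1 <;> simp

-- ===== VERDICT (by name: the statement is the Claim_ definition above) =====
theorem are_emotions_similar_py_spec : Claim_equal_are_emotions_similar_py := by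
  intro e1 e2 _
  unfold Spec_are_emotions_similar_py
  rcases pvClassify e1 with h1|h1|h1|h1|h1|h1|h1|h1|h1|h1|h1|h1 <;>
  rcases pvClassify e2 with h2|h2|h2|h2|h2|h2|h2|h2|h2|h2|h2|h2 <;>
  first
  | (subst h1; subst h2; decide)
  | (obtain ⟨a1, a2, a3, a4, a5, a6, a7, a8, a9, a10, a11⟩ := h1
     rw [pvScanLeftFalse e1 e2 a1 a2 a3 a4 a5 a6 a7 a8 a9 a10 a11,
         pvAltLeftFalse e1 e2 (pvLookupNone e1 a1 a2 a3 a4 a5 a6 a7 a8 a9 a10 a11)])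
  | (obtain ⟨b1, b2, b3, b4, b5, b6, b7, b8, b9, b10, b11⟩ := h2
     rw [pvScanRightFalse e1 e2 b1 b2 b3 b4 b5 b6 b7 b8 b9 b10 b11,
         pvAltRightFalse e1 e2 (pvLookupNone e2 b1 b2 b3 b4 b5 b6 b7 b8 b9 b10 b11)])
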